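-- pv_equiv track=rewrite | github.com/willywillywill/code_train | 萊恩杯/萊恩杯_2022/P3.py | c2
-- ===== SOURCE A (Python) =====
-- def c2(x):
--     x.sort()
--     k = 0
--     if 1 in x:
--         for i in range(1,len(x)):
--             if x[i-1]+1 != x[i]:
--                 k = 1
--     if 14 in x:
--         for i in range(1,len(x)):
--             if x[i-1]+1 != x[i]:
--                 k = 1
--     return bool(k)
-- ===== SOURCE B (Python) =====
-- def c2(x):
--     x.sort()
--     if 1 not in x and 14 not in x:
--         return False
--     return x != list(range(x[0], x[0] + len(x)))
-- ===== Notes on version B (the rewrite author's own statement) =====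
-- stated objective: simpler
-- what changed: Replaces the two duplicated adjacent-pair gap-scan loops (run under separate membership tests with a shared flag) by a single early return when neither 1 nor 14 is present plus one equality comparison of the sorted list against the expected consecutive run built with range from its minimum.
import Mathlib
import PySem

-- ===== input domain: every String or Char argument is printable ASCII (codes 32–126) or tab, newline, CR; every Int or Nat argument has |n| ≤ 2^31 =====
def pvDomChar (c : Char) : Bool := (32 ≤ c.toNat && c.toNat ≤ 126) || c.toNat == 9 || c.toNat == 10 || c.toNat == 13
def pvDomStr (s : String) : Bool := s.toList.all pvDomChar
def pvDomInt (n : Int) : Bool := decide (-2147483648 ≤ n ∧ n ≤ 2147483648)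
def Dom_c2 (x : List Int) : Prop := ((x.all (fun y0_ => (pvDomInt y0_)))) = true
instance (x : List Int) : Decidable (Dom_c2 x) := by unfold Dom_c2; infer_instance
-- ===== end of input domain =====

-- B replaces A's two identical adjacent-gap scan loops by one early return plus a comparison of
-- the sorted list with the consecutive range starting at its minimum (simpler; both A and B sort
-- x in place, the same mutation — the equivalence proved is about the return value).

-- ===== PORT A =====
def c2 (x : List Int) : Bool :=
  let s := PySem.List.sorted x (fun v => v) false
  let k : Int := 0
  let k : Int :=
    if (1 : Int) ∈ s then
      (PySem.List.pyRange 1 (s.length : Int) 1).foldl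
        (fun k i => if PySem.List.pyGetD s (i - 1) 0 + 1 ≠ PySem.List.pyGetD s i 0 then 1 else k) k
    else k
  let k : Int :=
    if (14 : Int) ∈ s then
      (PySem.List.pyRange 1 (s.length : Int) 1).foldl
        (fun k i => if PySem.List.pyGetD s (i - 1) 0 + 1 ≠ PySem.List.pyGetD s i 0 then 1 else k) k
    else k
  decide (k ≠ 0)

-- ===== PORT B =====
def c2_alt (x : List Int) : Bool :=
  let s := PySem.List.sorted x (fun v => v) false
  if (1 : Int) ∉ s ∧ (14 : Int) ∉ s then false
  else
    decide (s ≠ PySem.List.pyRange (PySem.List.pyGetD s 0 0) (PySem.List.pyGetD s 0 0 + (s.length : Int)) 1)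

-- ===== PRECONDITION & SPEC =====
def Spec_c2 (x : List Int) (out : Bool) : Prop := out = c2_alt x
instance (x : List Int) (out : Bool) : Decidable (Spec_c2 x out) := by unfold Spec_c2; infer_instance

-- ===== CLAIM (what is proved, stated in full; the proofs are below) =====
def Claim_equal_c2 : Prop := ∀ (x : List Int), Dom_c2 x → Spec_c2 x (c2 x)

-- ===== LEMMAS AND PROOFS =====

-- A's gap loop only ever sets the flag to 1: its result is 1 iff some index fires, else the initial flag
theorem gap_foldl_eq (p : Int → Prop) [DecidablePred p] (l : List Int) (k0 : Int) :
    l.foldl (fun k i => if p i then 1 else k) k0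
      = if l.any (fun i => decide (p i)) then 1 else k0 := by
  induction l generalizing k0 with
  | nil => simp
  | cons a t ih =>
    by_cases hp : p a <;> by_cases ht : t.any (fun i => decide (p i)) <;>
      simp [List.foldl_cons, hp, ht, ih]

-- the adjacent-gap scan A runs, as a predicate on any list
def hasGap (s : List Int) : Bool :=
  (PySem.List.pyRange 1 (s.length : Int) 1).any
    (fun i => decide (PySem.List.pyGetD s (i - 1) 0 + 1 ≠ PySem.List.pyGetD s i 0))

theorem hasGap_false_iff (s : List Int) :
    hasGap s = false ↔ ∀ k : Nat, (h : k + 1 < s.length) → s[k + 1] = s[k] + 1 := by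
  unfold hasGap
  rw [List.any_eq_false]
  constructor
  · intro H k h
    have hm : ((k : Int) + 1) ∈ PySem.List.pyRange 1 (s.length : Int) 1 := by
      rw [PySem.List.mem_pyRange_one]; omega
    have h5 := H _ hm
    rw [PySem.List.pyGetD_eq_getElem s (i := (k:Int)+1-1) 0 (by omega) (by omega),
        PySem.List.pyGetD_eq_getElem s (i := (k:Int)+1) 0 (by omega) (by omega)] at h5
    simp only [decide_eq_true_eq] at h5
    rw [not_ne_iff] at h5
    have e1 : ((k : Int) + 1).toNat = k + 1 := by omega
    have e2 : ((k : Int) + 1 - 1).toNat = k := by omega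
    simp only [e1, e2] at h5
    omega
  · intro H i hi
    rw [PySem.List.mem_pyRange_one] at hi
    have hlt : (i.toNat - 1) + 1 < s.length := by omega
    have h5 := H (i.toNat - 1) hlt
    rw [PySem.List.pyGetD_eq_getElem s (i := i - 1) 0 (by omega) (by omega),
        PySem.List.pyGetD_eq_getElem s (i := i) 0 (by omega) (by omega)]
    simp only [decide_eq_true_eq]
    rw [not_ne_iff]
    have e1 : (i - 1).toNat = i.toNat - 1 := by omega
    have e2 : i.toNat = i.toNat - 1 + 1 := by omega
    have g1 : s[(i - 1).toNat]'(by omega) = s[i.toNat - 1]'(by omega) := getElem_congr rfl e1 (by omega)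
    have g2 : s[i.toNat]'(by omega) = s[i.toNat - 1 + 1]'(by omega) := getElem_congr rfl e2 (by omega)
    rw [g1, g2]
    omega

-- a nonempty list has no adjacent gap iff it IS the consecutive run from its head
theorem run_iff (a : Int) (t : List Int) :
    (∀ k : Nat, (h : k + 1 < (a :: t).length) → (a :: t)[k + 1] = (a :: t)[k] + 1) ↔
      a :: t = PySem.List.pyRange a (a + ((a :: t).length : Int)) 1 := by
  constructor
  · intro H
    have hstep : ∀ k : Nat, (h : k < (a :: t).length) → (a :: t)[k] = a + k := by
      intro k
      induction k with
      | zero => intro h; simp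
      | succ n ih =>
        intro h
        rw [H n h, ih (by omega)]
        push_cast; ring
    apply List.ext_getElem
    · rw [PySem.List.length_pyRange_one]; omega
    · intro k h1 h2
      rw [PySem.List.getElem_pyRange_one, hstep k h1]
  · intro H k h
    rw [List.getElem_of_eq H, List.getElem_of_eq H (i := k)]
    rw [PySem.List.getElem_pyRange_one, PySem.List.getElem_pyRange_one]
    push_cast; ring

theorem hasGap_eq_decide_ne_run (a : Int) (t : List Int) :
    hasGap (a :: t)
      = decide (a :: t ≠ PySem.List.pyRange a (a + ((a :: t).length : Int)) 1) := by
  by_cases hg : hasGap (a :: t) = false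
  · rw [hg]
    exact (decide_eq_false (not_not_intro ((run_iff a t).mp ((hasGap_false_iff _).mp hg)))).symm
  · rw [Bool.not_eq_false] at hg
    rw [hg]
    symm
    apply decide_eq_true
    intro hrun
    have h0 := (hasGap_false_iff (a :: t)).mpr ((run_iff a t).mpr hrun)
    rw [h0] at hg
    exact Bool.false_ne_true hg

theorem c2_eq (x : List Int) : c2 x = c2_alt x := by
  simp only [c2, c2_alt]
  rw [gap_foldl_eq (fun i => PySem.List.pyGetD (PySem.List.sorted x (fun v => v) false) (i - 1) 0 + 1
        ≠ PySem.List.pyGetD (PySem.List.sorted x (fun v => v) false) i 0),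
      gap_foldl_eq (fun i => PySem.List.pyGetD (PySem.List.sorted x (fun v => v) false) (i - 1) 0 + 1
        ≠ PySem.List.pyGetD (PySem.List.sorted x (fun v => v) false) i 0)]
  generalize PySem.List.sorted x (fun v => v) false = s
  cases s with
  | nil => simp
  | cons a t =>
    have hgr := hasGap_eq_decide_ne_run a t
    unfold hasGap at hgr
    by_cases h1 : (1 : Int) ∈ a :: t <;> by_cases h14 : (14 : Int) ∈ a :: t <;>
      [skip; skip; skip; simp [h1, h14]] <;>
    · simp only [h1, h14, PySem.List.pyGetD_zero_cons, ite_true, not_true, not_false_iff,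
        and_false, and_true, if_neg, decide_not]
      simp only [ne_eq, decide_not] at hgr
      rw [hgr]
      by_cases hrun : a :: t = PySem.List.pyRange a (a + (((a :: t).length) : Int)) 1
      · rw [decide_eq_true hrun]; simp
      · rw [decide_eq_false hrun]; simp

-- ===== VERDICT (by name: the statement is the Claim_ definition above) =====
theorem c2_spec : Claim_equal_c2 := by
  intro x _
  unfold Spec_c2
  exact c2_eq x
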